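-- pv_equiv track=rewrite | github.com/k-young-passionate/Baekjoon | python_version/p17471.py | bfs
-- ===== SOURCE A (Python) =====
-- from collections import deque
-- from itertools import combinations
--
-- def check(connset, conn):  # 도시의 연결성 확인
--     queue = deque()
--     queue.append(connset[0])
--     connset.remove(connset[0])
--     while True:  # bfs 로 연결 관계 확인
--         if len(queue) == 0:  # loop 종료
--             if len(connset) == 0:  # 연결 다 되어 있으면 False
--                 return True
--             else:  # 연결 안 된 것 있으면 False
--                 return False
--
--         q = queue.popleft()  # deque
--         for c in conn[q]:  # 연결 가능한지 검색
--             if c in connset:  # 연결 가능 대상 찾으면 후보 지우고 enqueue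
--                 queue.append(c)
--                 connset.remove(c)
--
-- def bfs(N, city, conn):  #
--     result = -1
--     cities = [x for x in range(N)]
--     for i in range(1, len(cities) // 2 + 1):
--         cb = list(map(list, combinations(cities, i)))
--         for c in cb:
--             c2 = []
--             for j in cities:
--                 if j not in c:
--                     c2.append(j)
--
--             if check(c.copy(), conn) and check(c2.copy(),conn):
--                 s1 = sum([city[x] for x in c])
--                 s2 = sum([city[x] for x in c2])
--                 tmpresult = abs(s1 - s2)
--                 if result == -1 or tmpresult < result:
--                     result = tmpresult
--     return result
-- ===== SOURCE B (Python) =====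
-- from itertools import combinations
--
-- def _connected(nodes, conn):
--     # round-based reachability closure from nodes[0] within the node set
--     members = set(nodes)
--     seen = {nodes[0]}
--     while True:
--         new = {w for v in seen for w in conn[v] if w in members and w not in seen}
--         if not new:
--             return seen == members
--         seen |= new
--
-- def bfs(N, city, conn):
--     nodes = list(range(N))
--     total = sum(city[:N])
--     best = -1
--     for i in range(1, N // 2 + 1):
--         for c in combinations(nodes, i):
--             rest = [v for v in nodes if v not in c]
--             if _connected(list(c), conn) and _connected(rest, conn):
--                 s = sum(city[v] for v in c)
--                 d = abs(total - 2 * s)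
--                 if best == -1 or d < best:
--                     best = d
--     return best
-- ===== Notes on version B (the rewrite author's own statement) =====
-- stated objective: alternative
-- what changed: The queue-based BFS connectivity check with destructive removal from the candidate list is replaced by a round-based reachability-closure over a seen-set (no queue, no mutation of the subset), and the second half's population sum is obtained arithmetically from the precomputed total instead of a second summation pass.
-- outside the precondition, e.g. on bfs(3, [], [[], [], []]): A returns -1, B returns -1
import Mathlib
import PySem

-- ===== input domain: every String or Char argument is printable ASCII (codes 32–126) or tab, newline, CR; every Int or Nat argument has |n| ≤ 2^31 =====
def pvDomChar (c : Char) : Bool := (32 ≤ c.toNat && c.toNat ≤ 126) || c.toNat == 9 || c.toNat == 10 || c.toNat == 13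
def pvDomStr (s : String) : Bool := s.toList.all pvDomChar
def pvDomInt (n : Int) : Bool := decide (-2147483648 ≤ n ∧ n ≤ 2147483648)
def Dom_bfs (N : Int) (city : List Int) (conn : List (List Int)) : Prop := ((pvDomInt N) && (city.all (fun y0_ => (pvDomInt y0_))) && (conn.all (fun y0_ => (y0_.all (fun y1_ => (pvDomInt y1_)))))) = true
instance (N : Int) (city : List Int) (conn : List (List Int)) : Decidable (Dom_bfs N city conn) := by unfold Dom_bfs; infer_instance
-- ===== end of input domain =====

-- B replaces the queue-based BFS connectivity check by a round-based reachability closure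
-- over a seen-set and derives the second half's sum from the precomputed total (alternative).


-- ===== PORT A =====
-- inner loop of check: 'for c in conn[q]: if c in connset: queue.append(c); connset.remove(c)'
def checkStep (st : List Int × List Int) (c : Int) : List Int × List Int :=
  if c ∈ st.2 then (st.1 ++ [c], st.2.erase c) else st

-- termination measure bound for the inner fold (cited in checkLoop's decreasing_by)
theorem checkStep_measure (adj : List Int) : ∀ st : List Int × List Int,
    2 * (adj.foldl checkStep st).2.length + (adj.foldl checkStep st).1.length
      ≤ 2 * st.2.length + st.1.length := by
  induction adj with
  | nil => intro st; simp
  | cons a t ih =>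
      intro st
      refine le_trans (ih _) ?_
      unfold checkStep
      by_cases h : a ∈ st.2
      · simp only [if_pos h]
        have h1 := List.length_erase_of_mem h
        have h2 : 0 < st.2.length := List.length_pos_of_mem h
        simp only [List.length_append, List.length_cons, List.length_nil]
        omega
      · simp [if_neg h]

-- the 'while True' BFS loop of check
def checkLoop (conn : List (List Int)) (queue connset : List Int) : Bool :=
  match queue with
  | [] => decide (connset = [])                     -- len(queue)==0: True iff connset emptied
  | q :: rest =>
      -- conn[q]: none = IndexError, excluded by Pre_bfs
      let st := ((PySem.List.pyGet? conn q).getD []).foldl checkStep (rest, connset)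
      checkLoop conn st.1 st.2
termination_by 2 * connset.length + queue.length
decreasing_by
  have h := checkStep_measure ((PySem.List.pyGet? conn q).getD []) (rest, connset)
  have he1 : (rest, connset).1 = rest := rfl
  have he2 : (rest, connset).2 = connset := rfl
  rw [he1, he2] at h
  simp only [List.length_cons]
  omega

def check (connset : List Int) (conn : List (List Int)) : Bool :=
  match connset with
  | [] => false                                     -- unreachable: connset[0] would raise; bfs never calls with []
  | x :: rest => checkLoop conn [x] rest            -- queue=[connset[0]]; connset.remove(connset[0])

def bfs (N : Int) (city : List Int) (conn : List (List Int)) : Int :=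
  let cities := PySem.List.pyRange 0 N 1
  (PySem.List.pyRange 1 (PySem.Int.floordiv (PySem.List.len cities) 2 + 1) 1).foldl (fun result i =>
    (PySem.List.combinations cities i.toNat).foldl (fun result c =>
      let c2 := cities.foldl (fun acc j => if j ∉ c then acc ++ [j] else acc) []
      if check c conn && check c2 conn then
        -- city[x]: IndexError outside Pre_bfs, defaulted to 0 there
        let s1 := (c.map (fun x => PySem.List.pyGetD city x 0)).sum
        let s2 := (c2.map (fun x => PySem.List.pyGetD city x 0)).sum
        let tmp := |s1 - s2|
        if result = -1 ∨ tmp < result then tmp else result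
      else result) result) (-1)

-- ===== PORT B =====
-- 'new = {w for v in seen for w in conn[v] if w in members and w not in seen}'
def satNew (conn : List (List Int)) (members seen : List Int) : PySem.Set Int :=
  seen.foldl (fun acc v =>
    ((PySem.List.pyGet? conn v).getD []).foldl (fun acc w =>
      if w ∈ members ∧ w ∉ seen then PySem.Set.add acc w else acc) acc) PySem.Set.empty

-- membership in the freshly collected round (cited in satLoop's decreasing_by)
theorem mem_satNew (conn : List (List Int)) (members seen : List Int) (x : Int) :
    x ∈ satNew conn members seen ↔
      (∃ v ∈ seen, x ∈ (PySem.List.pyGet? conn v).getD []) ∧ x ∈ members ∧ x ∉ seen := by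
  have hinner : ∀ (adj : List Int) (acc : PySem.Set Int) (x : Int),
      (x ∈ adj.foldl (fun acc w => if w ∈ members ∧ w ∉ seen then PySem.Set.add acc w else acc) acc
      ↔ x ∈ acc ∨ (x ∈ adj ∧ x ∈ members ∧ x ∉ seen)) := by
    intro adj
    induction adj with
    | nil => simp
    | cons a t ih =>
        intro acc x
        simp only [List.foldl_cons]
        rw [ih]
        by_cases h : a ∈ members ∧ a ∉ seen
        · rw [if_pos h]
          rw [PySem.Set.mem_add]
          by_cases hx : x = a
          · subst hx; simp [h]; try tauto
          · simp [hx, List.mem_cons]; try tauto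
        · rw [if_neg h]
          by_cases hx : x = a
          · subst hx; simp [List.mem_cons]; try tauto
          · simp [hx, List.mem_cons]; try tauto
  have houter : ∀ (vs : List Int) (acc : PySem.Set Int) (x : Int),
      (x ∈ vs.foldl (fun acc v => ((PySem.List.pyGet? conn v).getD []).foldl
          (fun acc w => if w ∈ members ∧ w ∉ seen then PySem.Set.add acc w else acc) acc) acc
      ↔ x ∈ acc ∨ ((∃ v ∈ vs, x ∈ (PySem.List.pyGet? conn v).getD []) ∧ x ∈ members ∧ x ∉ seen)) := by
    intro vs
    induction vs with
    | nil => simp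
    | cons v vt ih =>
        intro acc x
        simp only [List.foldl_cons]
        rw [ih, hinner]
        constructor
        · rintro ((h | h) | h)
          · exact Or.inl h
          · exact Or.inr ⟨⟨v, by simp, h.1⟩, h.2⟩
          · exact Or.inr ⟨⟨h.1.choose, by simp [h.1.choose_spec.1], h.1.choose_spec.2⟩, h.2⟩
        · rintro (h | ⟨⟨u, hu, hadj⟩, hx⟩)
          · exact Or.inl (Or.inl h)
          · rcases List.mem_cons.mp hu with rfl | hu'
            · exact Or.inl (Or.inr ⟨hadj, hx⟩)
            · exact Or.inr ⟨⟨u, hu', hadj⟩, hx⟩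
  unfold satNew
  rw [houter]
  simp [PySem.Set.empty]

-- strict decrease of the unreached-members count (cited in satLoop's decreasing_by)
theorem filter_length_strict_lt {α : Type} (l : List α) (p q : α → Bool)
    (hmono : ∀ x ∈ l, q x = true → p x = true)
    (hstrict : ∃ x ∈ l, p x = true ∧ q x = false) :
    (l.filter q).length < (l.filter p).length := by
  induction l with
  | nil => obtain ⟨x, hx, _⟩ := hstrict; simp at hx
  | cons a t ih =>
      obtain ⟨x, hx, hpx, hqx⟩ := hstrict
      simp only [List.filter_cons]
      by_cases hqa : q a = true
      · have hpa : p a = true := hmono a (by simp) hqa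
        rw [if_pos hqa, if_pos hpa]
        simp only [List.length_cons]
        have hxt : x ∈ t := by
          rcases List.mem_cons.mp hx with h | h
          · rw [h, hqa] at hqx; cases hqx
          · exact h
        exact Nat.succ_lt_succ (ih (fun y hy => hmono y (List.mem_cons_of_mem _ hy)) ⟨x, hxt, hpx, hqx⟩)
      · rw [if_neg hqa]
        have hmono' : ∀ y ∈ t, q y = true → p y = true := fun y hy => hmono y (List.mem_cons_of_mem _ hy)
        have hle : (t.filter q).length ≤ (t.filter p).length := by
          rw [← List.countP_eq_length_filter, ← List.countP_eq_length_filter]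
          exact List.countP_mono_left hmono'
        by_cases hpa : p a = true
        · rw [if_pos hpa]; simp only [List.length_cons]; omega
        · rw [if_neg hpa]
          have hxt : x ∈ t := by
            rcases List.mem_cons.mp hx with rfl | h
            · rw [hpx] at hpa; exact absurd rfl hpa
            · exact h
          exact ih hmono' ⟨x, hxt, hpx, hqx⟩

def satLoop (conn : List (List Int)) (members seen : PySem.Set Int) : Bool :=
  let new := satNew conn members seen
  if new = ([] : List Int) then PySem.Set.equal seen members   -- 'if not new: return seen == members'
  else satLoop conn members (PySem.Set.union seen new)         -- 'seen |= new'
termination_by (members.filter (fun x => decide (x ∉ seen))).length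
decreasing_by
  rename_i hne
  apply filter_length_strict_lt
  · intro x _ hq
    simp only [decide_eq_true_eq] at hq ⊢
    intro hx
    exact hq ((PySem.Set.mem_union _ _ _).mpr (Or.inl hx))
  · obtain ⟨w, hw⟩ := List.exists_mem_of_ne_nil _ hne
    have h := (mem_satNew conn members seen w).mp hw
    refine ⟨w, h.2.1, by simp [h.2.2], ?_⟩
    simp only [decide_eq_false_iff_not, Decidable.not_not]
    exact (PySem.Set.mem_union _ _ _).mpr (Or.inr hw)

def connectedSat (nodes : List Int) (conn : List (List Int)) : Bool :=
  match nodes with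
  | [] => false                                     -- unreachable: nodes[0] would raise; bfs_alt never calls with []
  | x :: _ => satLoop conn (PySem.Set.ofList nodes) (PySem.Set.ofList [x])

def bfs_alt (N : Int) (city : List Int) (conn : List (List Int)) : Int :=
  let nodes := PySem.List.pyRange 0 N 1
  let total := (PySem.List.slice city none (some N)).sum       -- sum(city[:N])
  (PySem.List.pyRange 1 (PySem.Int.floordiv N 2 + 1) 1).foldl (fun best i =>
    (PySem.List.combinations nodes i.toNat).foldl (fun best c =>
      let rest := nodes.filter (fun v => v ∉ c)                 -- [v for v in nodes if v not in c]
      if connectedSat c conn && connectedSat rest conn then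
        let s := (c.map (fun v => PySem.List.pyGetD city v 0)).sum
        let d := |total - 2 * s|
        if best = -1 ∨ d < best then d else best
      else best) best) (-1)

-- ===== PRECONDITION & SPEC =====
-- Pre_ excludes the inputs where Python A raises IndexError (conn shorter than N is always hit;
-- city shorter than N is hit whenever some admissible split is connected); for N ≤ 1 A returns -1
-- without touching the lists.  It thereby also excludes rare inputs where A still returns -1
-- (city short, no connected split exists) — see the claim's cite; B returns -1 there too.
def Pre_bfs (N : Int) (city : List Int) (conn : List (List Int)) : Prop :=
  2 ≤ N → ((N ≤ (city.length : Int)) ∧ (N ≤ (conn.length : Int)))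
instance (N : Int) (city : List Int) (conn : List (List Int)) : Decidable (Pre_bfs N city conn) := by
  unfold Pre_bfs; infer_instance

def pvWitness_bfs : Int × List Int × List (List Int) := (4, [1, 2, 3, 4], [[1], [0, 2], [1, 3], [2]])

def Spec_bfs (N : Int) (city : List Int) (conn : List (List Int)) (out : Int) : Prop := out = bfs_alt N city conn
instance (N : Int) (city : List Int) (conn : List (List Int)) (out : Int) : Decidable (Spec_bfs N city conn out) := by unfold Spec_bfs; infer_instance

-- ===== CLAIM (what is proved, stated in full; the proofs are below) =====
def Claim_equal_bfs : Prop := ∀ (N : Int) (city : List Int) (conn : List (List Int)), Dom_bfs N city conn → Pre_bfs N city conn → Spec_bfs N city conn (bfs N city conn)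

-- ===== LEMMAS AND PROOFS =====

-- ---- the common mathematical content: directed reachability within a node set ----
def pvAdj (conn : List (List Int)) (v : Int) : List Int := (PySem.List.pyGet? conn v).getD []
def pvEdge (conn : List (List Int)) (S : List Int) (v w : Int) : Prop := w ∈ pvAdj conn v ∧ w ∈ S
def pvReach (conn : List (List Int)) (S : List Int) : Int → Int → Prop :=
  Relation.ReflTransGen (pvEdge conn S)

theorem pvReach_mono (conn : List (List Int)) (S S' : List Int) (hsub : ∀ x, x ∈ S' → x ∈ S)
    (v w : Int) (h : pvReach conn S' v w) : pvReach conn S v w :=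
  Relation.ReflTransGen.mono (fun _ _ he => ⟨he.1, hsub _ he.2⟩) h

theorem pvReach_right (conn : List (List Int)) (S : List Int) (v b : Int)
    (h : pvReach conn S v b) : b = v ∨ b ∈ S := by
  rcases Relation.ReflTransGen.cases_tail h with h | ⟨c, _, hc⟩
  · exact Or.inl h
  · exact Or.inr hc.2

theorem pvReach_closed (conn : List (List Int)) (S T : List Int)
    (hcl : ∀ v ∈ T, ∀ w, w ∈ pvAdj conn v → w ∈ S → w ∈ T)
    (v w : Int) (h : pvReach conn S v w) (hv : v ∈ T) : w ∈ T := by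
  induction h with
  | refl => exact hv
  | tail _ he ih => exact hcl _ ih _ he.1 he.2

-- ---- characterization of A's BFS ----
theorem checkFold_spec (adj : List Int) : ∀ (qu cs : List Int), cs.Nodup →
    ((adj.foldl checkStep (qu, cs)).2 = cs.filter (fun x => decide (x ∉ adj))) ∧
    (∀ x, x ∈ (adj.foldl checkStep (qu, cs)).1 ↔ x ∈ qu ∨ (x ∈ cs ∧ x ∈ adj)) := by
  induction adj with
  | nil =>
      intro qu cs _
      constructor
      · simp
      · simp
  | cons a t ih =>
      intro qu cs hnd
      simp only [List.foldl_cons]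
      by_cases ha : a ∈ cs
      · have hstep : checkStep (qu, cs) a = (qu ++ [a], cs.erase a) := by
          simp [checkStep, ha]
        rw [hstep]
        obtain ⟨h2, h1⟩ := ih (qu ++ [a]) (cs.erase a) (hnd.erase a)
        constructor
        · rw [h2, List.Nodup.erase_eq_filter hnd, List.filter_filter]
          apply List.filter_congr
          intro x hx
          by_cases hxa : x = a <;> by_cases hxt : x ∈ t <;> simp [hxa, hxt]
        · intro x
          rw [h1]
          simp only [List.mem_append, List.mem_cons,
            List.Nodup.mem_erase_iff hnd]
          constructor
          · rintro ((h | (rfl | h0)) | ⟨⟨hxa, hxc⟩, hxt⟩)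
            · exact Or.inl h
            · exact Or.inr ⟨ha, Or.inl rfl⟩
            · cases h0
            · exact Or.inr ⟨hxc, Or.inr hxt⟩
          · rintro (h | ⟨hxc, (rfl | hxt)⟩)
            · exact Or.inl (Or.inl h)
            · exact Or.inl (Or.inr (Or.inl rfl))
            · by_cases hxa : x = a
              · exact Or.inl (Or.inr (Or.inl hxa))
              · exact Or.inr ⟨⟨hxa, hxc⟩, hxt⟩
      · have hstep : checkStep (qu, cs) a = (qu, cs) := by
          simp [checkStep, ha]
        rw [hstep]
        obtain ⟨h2, h1⟩ := ih qu cs hnd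
        constructor
        · rw [h2]
          apply List.filter_congr
          intro x hx
          have hxa : x ≠ a := fun h => ha (h ▸ hx)
          simp [List.mem_cons, hxa]
        · intro x
          rw [h1]
          simp only [List.mem_cons]
          constructor
          · rintro (h | ⟨hxc, hxt⟩)
            · exact Or.inl h
            · exact Or.inr ⟨hxc, Or.inr hxt⟩
          · rintro (h | ⟨hxc, (rfl | hxt)⟩)
            · exact Or.inl h
            · exact absurd hxc ha
            · exact Or.inr ⟨hxc, hxt⟩

-- the crossing argument: a path into the surviving candidate set can be restarted at the new queue
theorem pvReach_down (conn : List (List Int)) (connset rest : List Int) (q : Int)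
    (hdisj : ∀ x, x = q ∨ x ∈ rest → x ∉ connset) :
    ∀ v w, pvReach conn connset v w → w ∈ connset → w ∉ pvAdj conn q →
    (v = q ∨ v ∈ rest ∨ (v ∈ connset ∧ v ∈ pvAdj conn q)) →
    ∃ u, (u ∈ rest ∨ (u ∈ connset ∧ u ∈ pvAdj conn q)) ∧
      pvReach conn (connset.filter (fun x => decide (x ∉ pvAdj conn q))) u w := by
  intro v w h
  induction h with
  | refl =>
      intro hw hwq hv
      rcases hv with rfl | hv | hv
      · exact absurd hw (hdisj _ (Or.inl rfl))
      · exact absurd hw (hdisj _ (Or.inr hv))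
      · exact absurd hv.2 hwq
  | @tail b w _ he ih =>
      intro hw hwq hv
      have hwf : w ∈ connset.filter (fun x => decide (x ∉ pvAdj conn q)) := by
        simp [List.mem_filter, hw, hwq]
      by_cases hb : b ∈ connset ∧ b ∉ pvAdj conn q
      · obtain ⟨u, hu, hr⟩ := ih hb.1 hb.2 hv
        exact ⟨u, hu, hr.tail ⟨he.1, hwf⟩⟩
      · rcases pvReach_right conn connset v b (by assumption) with rfl | hbc
        · rcases hv with rfl | hv | hv
          · exact absurd he.1 hwq
          · exact ⟨b, Or.inl hv, Relation.ReflTransGen.single ⟨he.1, hwf⟩⟩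
          · exact ⟨b, Or.inr hv, Relation.ReflTransGen.single ⟨he.1, hwf⟩⟩
        · have hbq : b ∈ pvAdj conn q := by
            by_cases h' : b ∈ pvAdj conn q
            · exact h'
            · exact absurd ⟨hbc, h'⟩ hb
          exact ⟨b, Or.inr ⟨hbc, hbq⟩, Relation.ReflTransGen.single ⟨he.1, hwf⟩⟩

theorem checkLoop_iff (conn : List (List Int)) (queue connset : List Int) :
    connset.Nodup → (∀ x ∈ queue, x ∉ connset) →
    (checkLoop conn queue connset = true ↔
      ∀ w ∈ connset, ∃ v ∈ queue, pvReach conn connset v w) := by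
  induction queue, connset using checkLoop.induct conn with
  | case1 connset =>
      intro _ _
      simp only [checkLoop]
      constructor
      · intro h w hw
        rw [decide_eq_true_eq] at h
        subst h
        simp at hw
      · intro h
        rw [decide_eq_true_eq]
        by_contra hne
        obtain ⟨w, hw⟩ := List.exists_mem_of_ne_nil _ hne
        obtain ⟨v, hv, _⟩ := h w hw
        simp at hv
  | case2 connset q rest st ih =>
      intro hnd hdq
      have hadj : (PySem.List.pyGet? conn q).getD [] = pvAdj conn q := rfl
      have hst : st = ((PySem.List.pyGet? conn q).getD []).foldl checkStep (rest, connset) := rfl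
      rw [hst] at ih
      rw [show checkLoop conn (q :: rest) connset =
            checkLoop conn (((PySem.List.pyGet? conn q).getD []).foldl checkStep (rest, connset)).1
              (((PySem.List.pyGet? conn q).getD []).foldl checkStep (rest, connset)).2 from by
        rw [checkLoop]]
      simp only [hadj] at ih ⊢
      obtain ⟨h2, h1⟩ := checkFold_spec ((PySem.List.pyGet? conn q).getD []) rest connset hnd
      rw [hadj] at h2 h1
      have hnd' : (connset.filter (fun x => decide (x ∉ pvAdj conn q))).Nodup := hnd.filter _
      have hd' : ∀ x ∈ ((pvAdj conn q).foldl checkStep (rest, connset)).1,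
          x ∉ connset.filter (fun x => decide (x ∉ pvAdj conn q)) := by
        intro x hx hmem
        rw [List.mem_filter, decide_eq_true_eq] at hmem
        rcases (h1 x).mp hx with h | h
        · exact hdq x (List.mem_cons_of_mem _ h) hmem.1
        · exact hmem.2 h.2
      rw [← h2] at hnd' hd'
      have hiff := ih hnd' hd'
      rw [h2] at hiff
      rw [h2, hiff]
      constructor
      · -- from the recursive characterization to the full one
        intro H w hw
        by_cases hwq : w ∈ pvAdj conn q
        · exact ⟨q, by simp, Relation.ReflTransGen.single ⟨hwq, hw⟩⟩
        · have hwf : w ∈ connset.filter (fun x => decide (x ∉ pvAdj conn q)) := by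
            simp [List.mem_filter, hw, hwq]
          obtain ⟨u, hu, hr⟩ := H w hwf
          have hr' : pvReach conn connset u w :=
            pvReach_mono conn connset _ (fun x hx => (List.mem_filter.mp hx).1) _ _ hr
          rcases (h1 u).mp hu with h | h
          · exact ⟨u, List.mem_cons_of_mem _ h, hr'⟩
          · exact ⟨q, by simp, Relation.ReflTransGen.head ⟨h.2, h.1⟩ hr'⟩
      · intro H w hw
        have hw' : w ∈ connset := (List.mem_filter.mp hw).1
        have hwq : w ∉ pvAdj conn q := by
          have := (List.mem_filter.mp hw).2
          rwa [decide_eq_true_eq] at this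
        obtain ⟨v, hv, hr⟩ := H w hw'
        have hdisj : ∀ x, x = q ∨ x ∈ rest → x ∉ connset := by
          rintro x (rfl | hx)
          · exact hdq x (by simp)
          · exact hdq x (List.mem_cons_of_mem _ hx)
        obtain ⟨u, hu, hr'⟩ := pvReach_down conn connset rest q hdisj v w hr hw' hwq
          (by rcases List.mem_cons.mp hv with rfl | h
              · exact Or.inl rfl
              · exact Or.inr (Or.inl h))
        refine ⟨u, ?_, hr'⟩
        rw [h1]
        rcases hu with h | h
        · exact Or.inl h
        · exact Or.inr ⟨h.1, h.2⟩

-- ---- characterization of B's round-based closure ----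
theorem satLoop_iff (conn : List (List Int)) (members : PySem.Set Int) (seen : PySem.Set Int) :
    seen.Nodup → (∀ x ∈ seen, x ∈ members) →
    (satLoop conn members seen = true ↔
      ∀ w ∈ members, ∃ v ∈ seen, pvReach conn members v w) := by
  induction seen using satLoop.induct conn members with
  | case1 seen new hnew =>
      intro _ hsub
      rw [satLoop, if_pos hnew]
      rw [PySem.Set.equal_iff]
      have hclosed : ∀ v ∈ seen, ∀ w, w ∈ pvAdj conn v → w ∈ members → w ∈ seen := by
        intro v hv w hwadj hwm
        by_contra hws
        have h0 : w ∈ satNew conn members seen :=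
          (mem_satNew conn members seen w).mpr ⟨⟨v, hv, hwadj⟩, hwm, hws⟩
        have h1 : satNew conn members seen = [] := hnew
        rw [h1] at h0
        cases h0
      constructor
      · intro h w hw
        exact ⟨w, (h w).mpr hw, Relation.ReflTransGen.refl⟩
      · intro h x
        constructor
        · intro hx; exact hsub x hx
        · intro hx
          obtain ⟨v, hv, hr⟩ := h x hx
          exact pvReach_closed conn members seen hclosed v x hr hv
  | case2 seen new hnew ih =>
      intro hnd hsub
      rw [satLoop, if_neg hnew]
      have hnd' : (seen.union new).Nodup := PySem.Set.nodup_union _ _ hnd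
      have hsub' : ∀ x ∈ seen.union new, x ∈ members := by
        intro x hx
        rcases (PySem.Set.mem_union _ _ _).mp hx with h | h
        · exact hsub x h
        · exact ((mem_satNew conn members seen x).mp h).2.1
      rw [ih hnd' hsub']
      constructor
      · intro H w hw
        obtain ⟨v, hv, hr⟩ := H w hw
        rcases (PySem.Set.mem_union _ _ _).mp hv with h | h
        · exact ⟨v, h, hr⟩
        · obtain ⟨⟨u, hu, hadj⟩, hm, _⟩ := (mem_satNew conn members seen v).mp h
          exact ⟨u, hu, Relation.ReflTransGen.head ⟨hadj, hm⟩ hr⟩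
      · intro H w hw
        obtain ⟨v, hv, hr⟩ := H w hw
        exact ⟨v, (PySem.Set.mem_union _ _ _).mpr (Or.inl hv), hr⟩

-- ---- the two connectivity checks agree on duplicate-free subsets ----
theorem pvReach_cons_cut (conn : List (List Int)) (x : Int) (cs : List Int) :
    ∀ w, pvReach conn (x :: cs) x w → w = x ∨ pvReach conn cs x w := by
  intro w h
  induction h with
  | refl => exact Or.inl rfl
  | @tail b w _ he ih =>
      by_cases hw : w = x
      · exact Or.inl hw
      · have hwcs : w ∈ cs := (List.mem_cons.mp he.2).resolve_left hw
        rcases ih with rfl | hr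
        · exact Or.inr (Relation.ReflTransGen.single ⟨he.1, hwcs⟩)
        · exact Or.inr (hr.tail ⟨he.1, hwcs⟩)

theorem check_eq_connectedSat (c : List Int) (conn : List (List Int)) (hnd : c.Nodup) :
    check c conn = connectedSat c conn := by
  match c with
  | [] => rfl
  | x :: cs =>
    have hxcs : x ∉ cs := (List.nodup_cons.mp hnd).1
    have hndcs : cs.Nodup := (List.nodup_cons.mp hnd).2
    have hA : check (x :: cs) conn = true ↔ ∀ w ∈ cs, pvReach conn cs x w := by
      show checkLoop conn [x] cs = true ↔ _
      rw [checkLoop_iff conn [x] cs hndcs (by simpa using hxcs)]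
      constructor
      · intro h w hw
        obtain ⟨v, hv, hr⟩ := h w hw
        rcases List.mem_cons.mp hv with rfl | h0
        · exact hr
        · cases h0
      · intro h w hw
        exact ⟨x, by simp, h w hw⟩
    have hofl : PySem.Set.ofList (x :: cs) = x :: cs := PySem.Set.ofList_eq_self_of_nodup _ hnd
    have hofl1 : PySem.Set.ofList [x] = [x] := PySem.Set.ofList_eq_self_of_nodup _ (by simp)
    have hB : connectedSat (x :: cs) conn = true ↔ ∀ w ∈ x :: cs, pvReach conn (x :: cs) x w := by
      show satLoop conn (PySem.Set.ofList (x :: cs)) (PySem.Set.ofList [x]) = true ↔ _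
      rw [hofl, hofl1]
      rw [satLoop_iff conn (x :: cs) [x] (by simp) (by simp)]
      constructor
      · intro h w hw
        obtain ⟨v, hv, hr⟩ := h w hw
        rcases List.mem_cons.mp hv with rfl | h0
        · exact hr
        · cases h0
      · intro h w hw
        exact ⟨x, by simp, h w hw⟩
    have hbridge : (∀ w ∈ x :: cs, pvReach conn (x :: cs) x w) ↔ (∀ w ∈ cs, pvReach conn cs x w) := by
      constructor
      · intro h w hw
        have := h w (List.mem_cons_of_mem _ hw)
        rcases pvReach_cons_cut conn x cs w this with rfl | hr
        · exact absurd hw hxcs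
        · exact hr
      · intro h w hw
        rcases List.mem_cons.mp hw with rfl | hw'
        · exact Relation.ReflTransGen.refl
        · exact pvReach_mono conn (x :: cs) cs (fun y hy => List.mem_cons_of_mem _ hy) _ _ (h w hw')
    apply Bool.coe_iff_coe.mp
    rw [hA, hB, hbridge]

-- ---- arithmetic bridge: sum(city[:N]) splits over a subset and its complement ----
theorem sum_take_eq (city : List Int) : ∀ n : Nat,
    (city.take n).sum = ((PySem.List.pyRange 0 (n : Int) 1).map (fun x => PySem.List.pyGetD city x 0)).sum := by
  intro n
  induction n with
  | zero => simp [PySem.List.pyRange_one_eq_nil]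
  | succ n ih =>
      rw [show ((n + 1 : Nat) : Int) = (n : Int) + 1 by push_cast; ring]
      rw [PySem.List.pyRange_one_succ_right (by positivity)]
      rw [List.map_append, List.sum_append, ← ih, List.take_add_one]
      rw [List.sum_append]
      congr 1
      have hgd : PySem.List.pyGetD city ((n : Nat) : Int) 0 = city.getD n 0 := by
        simp
      simp only [List.map_cons, List.map_nil]
      cases h : city[n]? with
      | none => simp [hgd, List.getD_eq_getElem?_getD, h]
      | some a => simp [hgd, List.getD_eq_getElem?_getD, h]

theorem sublist_perm_filter : ∀ {c l : List Int}, c.Sublist l → l.Nodup →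
    l.Perm (c ++ l.filter (fun x => decide (x ∉ c))) := by
  intro c l h
  induction h with
  | slnil => intro _; simp
  | @cons c l a h ih =>
      intro hnd
      have hnl := List.nodup_cons.mp hnd
      have hih := ih hnl.2
      have hac : a ∉ c := fun hc => hnl.1 (h.subset hc)
      rw [List.filter_cons, if_pos (by simpa using hac)]
      exact (hih.cons a).trans List.perm_middle.symm
  | @cons₂ c l a h ih =>
      intro hnd
      have hnl := List.nodup_cons.mp hnd
      have hih := ih hnl.2
      rw [List.filter_cons, if_neg (by simp)]
      have hfc : l.filter (fun x => decide (x ∉ a :: c)) = l.filter (fun x => decide (x ∉ c)) := by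
        apply List.filter_congr
        intro x hx
        have hxa : x ≠ a := fun he => hnl.1 (he ▸ hx)
        simp [List.mem_cons, hxa]
      rw [hfc]
      exact hih.cons a

theorem ports_agree (N : Int) (city : List Int) (conn : List (List Int)) :
    bfs N city conn = bfs_alt N city conn := by
  by_cases hN : 0 ≤ N
  · have hlen : PySem.List.len (PySem.List.pyRange 0 N 1) = N := by
      rw [PySem.List.len_eq, PySem.List.length_pyRange_one]; omega
    simp only [bfs, bfs_alt, hlen]
    apply PySem.List.foldl_congr_mem
    intro best i hi
    obtain ⟨hi1, hi2⟩ := (PySem.List.mem_pyRange_one).mp hi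
    apply PySem.List.foldl_congr_mem
    intro acc c hc
    obtain ⟨hsub, hlenc⟩ := (PySem.List.mem_combinations_iff _ _ _).mp hc
    have hndcit : (PySem.List.pyRange 0 N 1).Nodup := PySem.List.nodup_pyRange_one _ _
    have hndc : c.Nodup := hsub.nodup hndcit
    rw [PySem.List.foldl_append_ite_eq_filter, List.nil_append]
    rw [check_eq_connectedSat c conn hndc,
        check_eq_connectedSat _ conn (hndcit.filter _)]
    have hval : |(c.map (fun x => PySem.List.pyGetD city x 0)).sum -
        (((PySem.List.pyRange 0 N 1).filter (fun j => decide (j ∉ c))).map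
          (fun x => PySem.List.pyGetD city x 0)).sum| =
        |(PySem.List.slice city none (some N)).sum -
          2 * (c.map (fun v => PySem.List.pyGetD city v 0)).sum| := by
      have htot : (PySem.List.slice city none (some N)).sum =
          ((PySem.List.pyRange 0 N 1).map (fun x => PySem.List.pyGetD city x 0)).sum := by
        obtain ⟨n, hn⟩ := Int.eq_ofNat_of_zero_le hN
        subst hn
        rw [PySem.List.slice_to_natCast]
        exact sum_take_eq city n
      have hperm := sublist_perm_filter hsub hndcit
      have hsum := (hperm.map (fun x => PySem.List.pyGetD city x 0)).sum_eq
      rw [List.map_append, List.sum_append] at hsum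
      rw [htot, hsum]
      set s1 := (c.map (fun x => PySem.List.pyGetD city x 0)).sum
      set s2 := (((PySem.List.pyRange 0 N 1).filter (fun j => decide (j ∉ c))).map
          (fun x => PySem.List.pyGetD city x 0)).sum
      rw [show s1 + s2 - 2 * s1 = -(s1 - s2) by ring, abs_neg]
    rw [hval]
  · have h0 : PySem.List.pyRange 0 N 1 = [] := PySem.List.pyRange_one_eq_nil (by omega)
    have h1 : PySem.List.pyRange 1 (PySem.Int.floordiv (PySem.List.len (PySem.List.pyRange 0 N 1)) 2 + 1) 1 = [] := by
      rw [h0]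
      exact PySem.List.pyRange_one_eq_nil (by decide)
    have h2 : PySem.List.pyRange 1 (PySem.Int.floordiv N 2 + 1) 1 = [] := by
      rw [PySem.Int.floordiv_eq_ediv_of_pos (by norm_num)]
      exact PySem.List.pyRange_one_eq_nil (by omega)
    simp only [bfs, bfs_alt, h1, h2, List.foldl_nil]

-- ===== VERDICT (by name: the statement is the Claim_ definition above) =====
theorem bfs_spec : Claim_equal_bfs := by
  intro N city conn _ _
  unfold Spec_bfs
  exact ports_agree N city conn
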